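-- pv_equiv track=rewrite | github.com/ryanbreen/breenix | breenix-gdb-chat/scripts/lib/gdb_parser.py | format_registers_table
-- ===== SOURCE A (Python) =====
-- from typing import Dict, List, Any, Optional
--
-- def format_registers_table(registers: Dict[str, str]) -> str:
--     """
--     Format registers dict as a readable table.
--
--     Returns:
--     RAX: 0x0000000000000000  RBX: 0xffff800000010000
--     RCX: 0x0000000000000001  RDX: 0x0000000000000000
--     """
--     # Group into pairs for compact display
--     items = list(registers.items())
--     lines = []
--
--     for i in range(0, len(items), 2):
--         line_parts = []
--         for j in range(2):
--             if i + j < len(items):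
--                 name, value = items[i + j]
--                 line_parts.append(f"{name.upper():4}: {value:18}")
--         lines.append("  ".join(line_parts))
--
--     return '\n'.join(lines)
-- ===== SOURCE B (Python) =====
-- def format_registers_table(registers):
--     """Accumulator/flush single pass: buffer entries, flush every 2 as a line."""
--     lines = []
--     buf = []
--     for name, value in registers.items():
--         buf.append(f"{name.upper():4}: {value:18}")
--         if len(buf) == 2:
--             lines.append("  ".join(buf))
--             buf = []
--     if buf:
--         lines.append("  ".join(buf))
--     return '\n'.join(lines)
-- ===== Notes on version B (the rewrite author's own statement) =====
-- stated objective: simpler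
-- what changed: Replaces the index-stepped pairing (range(0,len,2) with an inner slot loop and bounds checks) by a single flat pass over the items with a 2-entry buffer that is flushed into a line whenever full, plus a final flush for an odd count.
import Mathlib
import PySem

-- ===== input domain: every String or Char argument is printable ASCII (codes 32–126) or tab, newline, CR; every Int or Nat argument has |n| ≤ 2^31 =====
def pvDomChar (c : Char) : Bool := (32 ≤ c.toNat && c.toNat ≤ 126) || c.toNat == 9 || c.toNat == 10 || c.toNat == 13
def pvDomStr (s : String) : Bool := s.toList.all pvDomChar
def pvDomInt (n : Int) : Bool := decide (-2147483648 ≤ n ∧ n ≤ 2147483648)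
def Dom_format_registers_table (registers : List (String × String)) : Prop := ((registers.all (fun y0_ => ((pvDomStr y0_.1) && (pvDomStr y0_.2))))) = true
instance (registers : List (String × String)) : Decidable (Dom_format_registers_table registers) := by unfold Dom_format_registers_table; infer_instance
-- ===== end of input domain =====

-- B replaces A's index-stepped pairing loop by a single flat pass with a 2-entry buffer flushed
-- into a line whenever full (objective: simpler decomposition, same cost).


-- ===== PORT A =====
-- f"{name.upper():4}: {value:18}" — width spec on a string left-justifies, padding with spaces
-- (exact for any string; hand-written because PySem has no format-spec primitive).
def pvPadR (cs : List Char) (w : Nat) : List Char := cs ++ List.replicate (w - cs.length) ' '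

def pvFmtEntry (p : String × String) : List Char :=
  pvPadR (PySem.Chars.upper p.1.toList) 4 ++ [':', ' '] ++ pvPadR p.2.toList 18

def pvSep : List Char := [' ', ' ']

def format_registers_table (registers : List (String × String)) : String :=
  let items := registers
  let lines : List (List Char) :=
    (PySem.List.pyRange 0 (PySem.List.len items) 2).foldl (fun lines i =>
      let line_parts : List (List Char) :=
        (PySem.List.pyRange 0 2 1).foldl (fun lp j =>
          if i + j < PySem.List.len items then
            -- items[i + j]: in range under the guard, so the default is never read
            lp ++ [pvFmtEntry (PySem.List.pyGetD items (i + j) ("", ""))]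
          else lp) []
      lines ++ [PySem.Chars.join pvSep line_parts]) []
  String.ofList (PySem.Chars.join ['\n'] lines)

-- ===== PORT B =====
def format_registers_table_alt (registers : List (String × String)) : String :=
  let st := registers.foldl (fun (st : List (List Char) × List (List Char)) p =>
      let buf := st.2 ++ [pvFmtEntry p]
      if buf.length = 2 then (st.1 ++ [PySem.Chars.join pvSep buf], [])
      else (st.1, buf)) ([], [])
  let lines := if st.2 ≠ [] then st.1 ++ [PySem.Chars.join pvSep st.2] else st.1
  String.ofList (PySem.Chars.join ['\n'] lines)

-- ===== PRECONDITION & SPEC =====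
-- Pre_ excludes lists with duplicate register names: the Python argument is a dict, which cannot
-- hold duplicate keys (a dict built from such a list silently collapses them), so the association
-- list ↔ dict correspondence only covers lists whose keys are pairwise distinct.
def Pre_format_registers_table (registers : List (String × String)) : Prop :=
  (registers.map Prod.fst).Nodup
instance (registers : List (String × String)) : Decidable (Pre_format_registers_table registers) := by unfold Pre_format_registers_table; infer_instance

def pvWitness_format_registers_table : (List (String × String)) :=
  [("rax", "0x0000000000000000"), ("rbx", "0xffff800000010000"), ("rcx", "0x1")]

def Spec_format_registers_table (registers : List (String × String)) (out : String) : Prop := out = format_registers_table_alt registers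
instance (registers : List (String × String)) (out : String) : Decidable (Spec_format_registers_table registers out) := by unfold Spec_format_registers_table; infer_instance

-- ===== CLAIM (what is proved, stated in full; the proofs are below) =====
def Claim_equal_format_registers_table : Prop := ∀ (registers : List (String × String)), Dom_format_registers_table registers → Pre_format_registers_table registers → Spec_format_registers_table registers (format_registers_table registers)

-- ===== LEMMAS AND PROOFS =====

-- Reference chunking both ports are reduced to: one formatted line per pair of entries.
def pvPairLines : List (String × String) → List (List Char)
  | [] => []
  | [p] => [pvFmtEntry p]
  | p :: q :: rest => (pvFmtEntry p ++ pvSep ++ pvFmtEntry q) :: pvPairLines rest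

-- A's line for outer index 2*k, after the inner j-loop over [0,1] is unfolded (Nat indices).
def pvLineA (l : List (String × String)) (k : Nat) : List Char :=
  PySem.Chars.join pvSep
    ((if 2 * k < l.length then [pvFmtEntry (l.getD (2 * k) ("", ""))] else []) ++
     (if 2 * k + 1 < l.length then [pvFmtEntry (l.getD (2 * k + 1) ("", ""))] else []))

lemma pvPyRange02 (n : Nat) :
    PySem.List.pyRange 0 (n : Int) 2 = (List.range ((n + 1) / 2)).map (fun k => ((2 * k : Nat) : Int)) := by
  rw [PySem.List.pyRange_of_pos _ _ (by norm_num : (0:Int) < 2)]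
  rcases Nat.eq_zero_or_pos n with h | h
  · subst h; simp
  · have h0 : (0:Int) < (n:Int) := by exact_mod_cast h
    rw [if_pos h0]
    have hc : (((n:Int) - 0 + 2 - 1) / 2).toNat = (n + 1) / 2 := by omega
    rw [hc]
    refine List.map_congr_left ?_
    intro k _
    push_cast
    ring

lemma pvALines_eq (l : List (String × String)) :
    (List.range ((l.length + 1) / 2)).map (pvLineA l) = pvPairLines l := by
  induction l using pvPairLines.induct with
  | case1 => simp [pvPairLines]
  | case2 p =>
      simp [pvPairLines, pvLineA, PySem.Chars.join_singleton, List.range_succ]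
  | case3 p q rest ih =>
      have hcnt : ((p :: q :: rest).length + 1) / 2 = ((rest.length + 1) / 2) + 1 := by
        simp only [List.length_cons]; omega
      rw [hcnt, List.range_succ_eq_map, List.map_cons, List.map_map]
      have h0 : pvLineA (p :: q :: rest) 0 = pvFmtEntry p ++ pvSep ++ pvFmtEntry q := by
        simp [pvLineA, PySem.Chars.join_cons_cons, PySem.Chars.join_singleton]
      have hs : (pvLineA (p :: q :: rest)) ∘ (fun k => k + 1) = pvLineA rest := by
        funext k
        simp only [Function.comp, pvLineA, List.length_cons]
        have c1 : (2 * (k + 1) < rest.length + 1 + 1) ↔ (2 * k < rest.length) := by omega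
        have c2 : (2 * (k + 1) + 1 < rest.length + 1 + 1) ↔ (2 * k + 1 < rest.length) := by omega
        have e1 : (p :: q :: rest).getD (2 * (k + 1)) ("", "") = rest.getD (2 * k) ("", "") := by
          have h : 2 * (k + 1) = 2 * k + 1 + 1 := by ring
          rw [h]; simp
        have e2 : (p :: q :: rest).getD (2 * (k + 1) + 1) ("", "") = rest.getD (2 * k + 1) ("", "") := by
          have h : 2 * (k + 1) + 1 = 2 * k + 1 + 1 + 1 := by ring
          rw [h]; simp
        simp only [c1, c2, e1, e2]
      rw [h0, hs, ih]
      rfl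

lemma pvPortA_lines (l : List (String × String)) :
    ((PySem.List.pyRange 0 (PySem.List.len l) 2).foldl (fun lines i =>
      lines ++ [PySem.Chars.join pvSep
        ((PySem.List.pyRange 0 2 1).foldl (fun lp j =>
          if i + j < PySem.List.len l then
            lp ++ [pvFmtEntry (PySem.List.pyGetD l (i + j) ("", ""))]
          else lp) [])]) []) = pvPairLines l := by
  rw [PySem.List.foldl_append_singleton_eq_map
      (f := fun i => PySem.Chars.join pvSep
        ((PySem.List.pyRange 0 2 1).foldl (fun lp j =>
          if i + j < PySem.List.len l then
            lp ++ [pvFmtEntry (PySem.List.pyGetD l (i + j) ("", ""))]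
          else lp) []))]
  simp only [List.nil_append, PySem.List.len_eq, pvPyRange02, List.map_map]
  rw [← pvALines_eq l]
  refine List.map_congr_left ?_
  intro k _
  simp only [Function.comp]
  -- unfold the inner loop over range(0, 2, 1) = [0, 1]
  have hr : PySem.List.pyRange 0 2 1 = [0, 1] := by decide
  rw [hr]
  simp only [List.foldl]
  have c0 : (2 * (k : Int) < (l.length : Int)) ↔ (2 * k < l.length) := by omega
  have c1 : (2 * (k : Int) + 1 < (l.length : Int)) ↔ (2 * k + 1 < l.length) := by omega
  have hg0 : PySem.List.pyGetD l (2 * (k : Int)) ("", "") = l.getD (2 * k) ("", "") := by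
    have h : 2 * (k : Int) = ((2 * k : Nat) : Int) := by push_cast; ring
    rw [h, PySem.List.pyGetD_natCast]
  have hg1 : PySem.List.pyGetD l (2 * (k : Int) + 1) ("", "") = l.getD (2 * k + 1) ("", "") := by
    have h : 2 * (k : Int) + 1 = ((2 * k + 1 : Nat) : Int) := by push_cast; ring
    rw [h, PySem.List.pyGetD_natCast]
  unfold pvLineA
  by_cases h0 : 2 * k < l.length <;> by_cases h1 : 2 * k + 1 < l.length <;>
    simp [h0, h1, c0, c1, hg0, hg1]

-- B's loop: starting from an empty buffer, two items become one line; pvPairLines results.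
def pvBStep (st : List (List Char) × List (List Char)) (p : String × String) :
    List (List Char) × List (List Char) :=
  let buf := st.2 ++ [pvFmtEntry p]
  if buf.length = 2 then (st.1 ++ [PySem.Chars.join pvSep buf], [])
  else (st.1, buf)

lemma pvPortB_lines (l : List (String × String)) (lines : List (List Char)) :
    (let st := l.foldl pvBStep (lines, []);
     if st.2 ≠ [] then st.1 ++ [PySem.Chars.join pvSep st.2] else st.1) =
      lines ++ pvPairLines l := by
  induction l using pvPairLines.induct generalizing lines with
  | case1 => simp [pvPairLines]
  | case2 p =>
      simp [pvPairLines, pvBStep, PySem.Chars.join_singleton]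
  | case3 p q rest ih =>
      have hstep : (p :: q :: rest).foldl pvBStep (lines, []) =
          rest.foldl pvBStep (lines ++ [pvFmtEntry p ++ pvSep ++ pvFmtEntry q], []) := by
        simp [pvBStep, PySem.Chars.join_cons_cons, PySem.Chars.join_singleton]
      simp only [hstep, pvPairLines]
      rw [ih]
      simp

-- ===== VERDICT (by name: the statement is the Claim_ definition above) =====
theorem format_registers_table_spec : Claim_equal_format_registers_table := by
  intro registers _ _
  unfold Spec_format_registers_table format_registers_table format_registers_table_alt
  simp only []
  rw [pvPortA_lines registers]
  have hb := pvPortB_lines registers []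
  simp only [List.nil_append] at hb
  rw [show (registers.foldl (fun (st : List (List Char) × List (List Char)) p =>
      let buf := st.2 ++ [pvFmtEntry p]
      if buf.length = 2 then (st.1 ++ [PySem.Chars.join pvSep buf], [])
      else (st.1, buf)) ([], [])) = registers.foldl pvBStep ([], []) from rfl]
  rw [hb]
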